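-- pv_equiv track=rewrite | github.com/master1223347/Alpha0-Quant | src/data/validator.py | _count_order_and_duplicates
-- ===== SOURCE A (Python) =====
-- from typing import Any
--
-- def _count_order_and_duplicates(rows: list[dict[str, Any]]) -> tuple[int, int]:
--     duplicate_timestamps = 0
--     out_of_order_pairs = 0
--     seen: set[Any] = set()
--     previous_timestamp = None
--
--     for row in rows:
--         timestamp = row.get("timestamp")
--         if timestamp in seen:
--             duplicate_timestamps += 1
--         seen.add(timestamp)
--
--         if previous_timestamp is not None and timestamp is not None and timestamp < previous_timestamp:
--             out_of_order_pairs += 1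
--         previous_timestamp = timestamp
--
--     return duplicate_timestamps, out_of_order_pairs
-- ===== SOURCE B (Python) =====
-- def _count_order_and_duplicates(rows):
--     ts = [row.get("timestamp") for row in rows]
--     s = sorted(ts, key=lambda x: (x is None, 0 if x is None else x))
--     duplicate_timestamps = sum(1 for a, b in zip(s, s[1:]) if a == b)
--     out_of_order_pairs = sum(
--         1 for a, b in zip(ts, ts[1:]) if a is not None and b is not None and b < a
--     )
--     return duplicate_timestamps, out_of_order_pairs
-- ===== Notes on version B (the rewrite author's own statement) =====
-- stated objective: alternative
-- what changed: Replaces A's fused loop with its incremental hash set and previous pointer by a sort-based method: extract the timestamps once, sort them (None last) and count adjacent equal pairs for duplicates, and count descending adjacent pairs of the original sequence in a separate pass for out-of-order.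
import Mathlib
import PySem

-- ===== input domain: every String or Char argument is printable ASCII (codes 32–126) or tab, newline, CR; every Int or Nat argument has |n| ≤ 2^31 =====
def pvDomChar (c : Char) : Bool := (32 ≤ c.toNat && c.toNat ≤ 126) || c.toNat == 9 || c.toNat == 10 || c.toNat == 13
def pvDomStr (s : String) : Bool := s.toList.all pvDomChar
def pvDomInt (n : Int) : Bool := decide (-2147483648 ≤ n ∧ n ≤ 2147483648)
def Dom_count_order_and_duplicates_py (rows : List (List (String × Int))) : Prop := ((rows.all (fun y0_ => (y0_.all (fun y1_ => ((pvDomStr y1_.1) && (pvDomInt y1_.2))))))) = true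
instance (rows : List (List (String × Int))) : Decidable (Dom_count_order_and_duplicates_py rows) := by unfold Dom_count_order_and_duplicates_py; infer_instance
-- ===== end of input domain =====

-- B replaces A's fused loop (incremental seen-set + previous pointer) by a sort-based
-- method: sort the extracted timestamps (None last) and count adjacent equal pairs for
-- duplicates, plus a separate adjacent-pair pass for out-of-order; objective: alternative.

-- ===== PORT A =====
-- A's loop, fused: state = (duplicate_timestamps, out_of_order_pairs, seen, previous_timestamp)
def count_order_and_duplicates_py (rows : List (List (String × Int))) : Int × Int :=
  let st := rows.foldl
    (fun (st : Int × Int × PySem.Set (Option Int) × Option Int) row =>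
      let dup := st.1
      let ooo := st.2.1
      let seen := st.2.2.1
      let prev := st.2.2.2
      let ts := (PySem.Dict.mk row).get? "timestamp"   -- row.get("timestamp")
      let dup := if seen.contains ts then dup + 1 else dup
      let seen := seen.add ts
      -- 'previous_timestamp is not None and timestamp is not None and timestamp < previous_timestamp'
      let ooo := if prev.isSome && ts.isSome && decide (ts.getD 0 < prev.getD 0) then ooo + 1 else ooo
      (dup, ooo, seen, ts))
    (0, 0, PySem.Set.empty, none)
  (st.1, st.2.1)

-- ===== PORT B =====
-- Python's key lambda x: (x is None, 0 if x is None else x); tuples compare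
-- lexicographically, which is exactly the Lex order on Bool × Int (False < True).
def pvKey (x : Option Int) : Bool ×ₗ Int := toLex (x.isNone, x.getD 0)

-- Source B: ts extracted once; s = sorted(ts, key=…); duplicates = adjacent equal pairs of s;
-- out-of-order = count over zip(ts, ts[1:])
def count_order_and_duplicates_py_alt (rows : List (List (String × Int))) : Int × Int :=
  let ts := rows.map (fun row => (PySem.Dict.mk row).get? "timestamp")
  let s := PySem.List.sorted ts pvKey false
  -- s[1:] / ts[1:] = .drop 1 (exact: start index 1 ≥ 0)
  let dup : Int := (((s.zip (s.drop 1)).countP (fun p => p.1 == p.2)) : Int)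
  let ooo : Int :=
    (((ts.zip (ts.drop 1)).countP
      (fun p => p.1.isSome && p.2.isSome && decide (p.2.getD 0 < p.1.getD 0))) : Int)
  (dup, ooo)

-- ===== PRECONDITION & SPEC =====
def Spec_count_order_and_duplicates_py (rows : List (List (String × Int))) (out : Int × Int) : Prop := out = count_order_and_duplicates_py_alt rows
instance (rows : List (List (String × Int))) (out : Int × Int) : Decidable (Spec_count_order_and_duplicates_py rows out) := by unfold Spec_count_order_and_duplicates_py; infer_instance

-- ===== CLAIM (what is proved, stated in full; the proofs are below) =====
def Claim_equal_count_order_and_duplicates_py : Prop := ∀ (rows : List (List (String × Int))), Dom_count_order_and_duplicates_py rows → Spec_count_order_and_duplicates_py rows (count_order_and_duplicates_py rows)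

-- ===== LEMMAS AND PROOFS =====

-- A's loop body, abstracted over the extracted timestamp
def pvStep (st : Int × Int × PySem.Set (Option Int) × Option Int) (ts : Option Int) :
    Int × Int × PySem.Set (Option Int) × Option Int :=
  let dup := if st.2.2.1.contains ts then st.1 + 1 else st.1
  let seen := st.2.2.1.add ts
  let ooo := if st.2.2.2.isSome && ts.isSome && decide (ts.getD 0 < st.2.2.2.getD 0) then st.2.1 + 1 else st.2.1
  (dup, ooo, seen, ts)

def pvPred (p : Option Int × Option Int) : Bool :=
  p.1.isSome && p.2.isSome && decide (p.2.getD 0 < p.1.getD 0)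

lemma pvStep_fst (l : List (Option Int)) (d o : Int) (s : PySem.Set (Option Int)) (p : Option Int) :
    (l.foldl pvStep (d, o, s, p)).1
      = d + (l.length : Int) + (s.length : Int) - ((l.foldl PySem.Set.add s).length : Int) := by
  induction l generalizing d o s p with
  | nil => simp
  | cons t l ih =>
    by_cases h : s.contains t
    · have hm : t ∈ s := by simpa [PySem.Set.contains] using h
      have hadd : s.add t = s := by simp [PySem.Set.add, hm]
      simp only [List.foldl_cons, pvStep, hadd, h, if_pos]
      rw [ih]
      simp; ring
    · have hm : t ∉ s := by simpa [PySem.Set.contains] using h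
      have hadd : s.add t = s ++ [t] := by simp [PySem.Set.add, hm]
      simp only [List.foldl_cons, pvStep, h, if_neg, Bool.false_eq_true, not_false_iff]
      rw [ih, hadd]
      simp; ring

lemma pvStep_snd (l : List (Option Int)) (d o : Int) (s : PySem.Set (Option Int)) (p : Option Int) :
    (l.foldl pvStep (d, o, s, p)).2.1
      = o + (((p :: l).zip l).countP pvPred : Int) := by
  induction l generalizing d o s p with
  | nil => simp
  | cons t l ih =>
    simp only [List.foldl_cons, pvStep]
    rw [ih]
    cases p with
    | none => simp [pvPred, List.zip]
    | some pv =>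
      cases t with
      | none => simp [pvPred, List.zip]
      | some tv =>
        by_cases h : tv < pv
        · simp [pvPred, List.zip, h]; ring
        · simp [pvPred, List.zip, h]

lemma pvKey_injective : Function.Injective pvKey := by
  intro x y h
  cases x <;> cases y <;> simp_all [pvKey]

-- adjacent-equal-pair count, the recursion behind B's first zip/countP
def pvCntAdj : List (Option Int) → Nat
  | [] => 0
  | [_] => 0
  | a :: b :: t => (if a = b then 1 else 0) + pvCntAdj (b :: t)

lemma countP_zip_eq_cntAdj (l : List (Option Int)) :
    (l.zip (l.drop 1)).countP (fun p => p.1 == p.2) = pvCntAdj l := by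
  induction l with
  | nil => rfl
  | cons a l ih =>
    cases l with
    | nil => rfl
    | cons b t =>
      simp only [List.drop_succ_cons, List.drop_zero, List.zip_cons_cons, List.countP_cons,
        pvCntAdj]
      rw [← ih]
      simp only [List.drop_one]
      by_cases h : a = b
      · simp [h]; omega
      · simp [h]

lemma dedup_length_le (l : List (Option Int)) : l.dedup.length ≤ l.length := by
  induction l with
  | nil => simp
  | cons a l ih =>
    by_cases h : a ∈ l
    · rw [List.dedup_cons_of_mem h]; exact Nat.le_succ_of_le ih
    · rw [List.dedup_cons_of_notMem h]; simpa using ih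

-- on a key-sorted list, adjacent equal pairs count every repeated occurrence: n - #distinct
lemma cntAdj_sorted (l : List (Option Int))
    (hs : l.Pairwise (fun a b => pvKey a ≤ pvKey b)) :
    pvCntAdj l = l.length - l.dedup.length := by
  induction l with
  | nil => rfl
  | cons a l ih =>
    cases l with
    | nil => simp [pvCntAdj]
    | cons b t =>
      have hs' : (b :: t).Pairwise (fun a b => pvKey a ≤ pvKey b) := hs.tail
      have hab : pvKey a ≤ pvKey b := (List.pairwise_cons.1 hs).1 b (by simp)
      have ihs := ih hs'
      have hlen := dedup_length_le (b :: t)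
      by_cases h : a = b
      · have hmem : a ∈ b :: t := by simp [h]
        rw [List.dedup_cons_of_mem hmem]
        simp only [pvCntAdj, if_pos h, ihs]
        simp only [List.length_cons] at hlen ⊢
        omega
      · have hmem : a ∉ b :: t := by
          intro hm
          rcases List.mem_cons.1 hm with h1 | h2
          · exact h h1
          · -- a occurs after b in a sorted list while key a ≤ key b: keys equal, so a = b
            have hba : pvKey b ≤ pvKey a := (List.pairwise_cons.1 hs').1 a h2
            exact h (pvKey_injective (le_antisymm hab hba))
        rw [List.dedup_cons_of_notMem hmem]
        simp only [pvCntAdj, if_neg h, ihs]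
        simp only [List.length_cons] at hlen ⊢
        omega

-- ===== VERDICT (by name: the statement is the Claim_ definition above) =====
theorem count_order_and_duplicates_py_spec : Claim_equal_count_order_and_duplicates_py := by
  intro rows _
  unfold Spec_count_order_and_duplicates_py
  show count_order_and_duplicates_py rows = count_order_and_duplicates_py_alt rows
  unfold count_order_and_duplicates_py count_order_and_duplicates_py_alt
  set f : List (String × Int) → Option Int := fun row => (PySem.Dict.mk row).get? "timestamp" with hf
  set ts : List (Option Int) := rows.map f with hts
  have hfold : rows.foldl
      (fun (st : Int × Int × PySem.Set (Option Int) × Option Int) row =>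
        let dup := st.1
        let ooo := st.2.1
        let seen := st.2.2.1
        let prev := st.2.2.2
        let t := f row
        let dup := if seen.contains t then dup + 1 else dup
        let seen := seen.add t
        let ooo := if prev.isSome && t.isSome && decide (t.getD 0 < prev.getD 0) then ooo + 1 else ooo
        (dup, ooo, seen, t))
      (0, 0, PySem.Set.empty, none) = ts.foldl pvStep (0, 0, PySem.Set.empty, none) := by
    rw [hts, List.foldl_map]
    rfl
  refine Prod.ext ?_ ?_
  · -- duplicates: A's incremental count = sorted-adjacent-equal count
    show _ = ((((PySem.List.sorted ts pvKey false).zip ((PySem.List.sorted ts pvKey false).drop 1)).countP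
        (fun p => p.1 == p.2) : Nat) : Int)
    rw [hfold, pvStep_fst]
    set s := PySem.List.sorted ts pvKey false with hsdef
    have hperm : s.Perm ts := PySem.List.sorted_perm ts pvKey false
    have hpair : s.Pairwise (fun a b => pvKey a ≤ pvKey b) := PySem.List.sorted_pairwise ts pvKey
    rw [countP_zip_eq_cntAdj, cntAdj_sorted s hpair]
    -- |set(ts)| = |ts.dedup| = |s.dedup|
    have h1 : (ts.foldl PySem.Set.add PySem.Set.empty) = PySem.Set.ofList ts := by
      rw [PySem.Set.ofList_eq_foldl]; rfl
    have h2 : PySem.Set.ofList ts = PySem.List.dedup ts := (PySem.List.dedup_eq_ofList ts).symm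
    have h3 : (PySem.List.dedup ts).length = ts.dedup.length := by
      have hperm' : (PySem.List.dedup ts).Perm ts.dedup := by
        apply (List.perm_ext_iff_of_nodup (PySem.List.nodup_dedup ts) ts.nodup_dedup).2
        intro x
        rw [PySem.List.mem_dedup, List.mem_dedup]
      exact hperm'.length_eq
    have h4 : s.dedup.Perm ts.dedup := hperm.dedup
    have h5 : s.length = ts.length := hperm.length_eq
    have h6 := dedup_length_le s
    rw [h1, h2, h3, ← h4.length_eq, ← h5]
    simp [PySem.Set.empty]
    omega
  · rw [hfold]
    show (ts.foldl pvStep (0, 0, PySem.Set.empty, none)).2.1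
        = ((((ts.zip (ts.drop 1)).countP
        (fun p => p.1.isSome && p.2.isSome && decide (p.2.getD 0 < p.1.getD 0))) : Nat) : Int)
    rw [pvStep_snd]
    have hzip : ((none :: ts).zip ts).countP pvPred = (ts.zip (ts.drop 1)).countP pvPred := by
      cases ts with
      | nil => rfl
      | cons a l => simp [List.zip, pvPred]
    have hpred : pvPred = (fun (p : Option Int × Option Int) => p.1.isSome && p.2.isSome && decide (p.2.getD 0 < p.1.getD 0)) := rfl
    rw [← hpred, ← hzip]
    simp
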